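-- pv_equiv track=rewrite | github.com/Frank-zhang-98/wechat-agent-lite-public | app/runtime/facade.py | _trim_blank_lines
-- ===== SOURCE A (Python) =====
-- def _trim_blank_lines(lines: list[str]) -> list[str]:
--     start = 0
--     end = len(lines)
--     while start < end and not str(lines[start] or "").strip():
--         start += 1
--     while end > start and not str(lines[end - 1] or "").strip():
--         end -= 1
--     return [str(line).rstrip() for line in lines[start:end]]
-- ===== SOURCE B (Python) =====
-- def _trim_blank_lines(lines: list[str]) -> list[str]:
--     idx = [i for i, l in enumerate(lines) if str(l or "").strip()]
--     if not idx:
--         return []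
--     return [str(line).rstrip() for line in lines[idx[0]: idx[-1] + 1]]
-- ===== Notes on version B (the rewrite author's own statement) =====
-- stated objective: alternative
-- what changed: Replaces A's two inward-scanning while loops with a single enumerate pass that collects the non-blank indices, then slices the list from the first to the last recorded index.
import Mathlib
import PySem

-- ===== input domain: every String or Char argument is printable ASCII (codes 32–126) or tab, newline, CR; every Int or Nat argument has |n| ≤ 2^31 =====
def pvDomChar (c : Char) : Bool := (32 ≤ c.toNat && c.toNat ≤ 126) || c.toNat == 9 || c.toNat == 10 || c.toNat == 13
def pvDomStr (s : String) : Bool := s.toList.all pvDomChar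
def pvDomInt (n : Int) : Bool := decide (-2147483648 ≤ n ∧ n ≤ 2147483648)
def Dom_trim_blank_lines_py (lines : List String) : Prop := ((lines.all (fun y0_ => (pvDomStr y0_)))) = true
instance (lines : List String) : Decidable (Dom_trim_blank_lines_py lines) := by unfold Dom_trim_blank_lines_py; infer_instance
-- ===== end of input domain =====

-- B replaces A's two inward-scanning while loops by one enumerate pass that records the
-- non-blank indices and slices from the first to the last (objective: alternative decomposition).

-- `not str(l or "").strip()` — the blank test both Pythons use (on a str, `str` is the identity)
def pyBlank (s : String) : Bool := PySem.Str.strip (if s == "" then "" else s) == ""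

-- ===== PORT A =====
-- first while loop: advance start while the line is blank
def aStart (lines : List String) (ed st : Nat) : Nat :=
  if _h : st < ed then
    if pyBlank (lines.getD st "") then aStart lines ed (st + 1) else st
  else st
termination_by ed - st

-- second while loop: retreat end while the line before it is blank
def aEnd (lines : List String) (st ed : Nat) : Nat :=
  if _h : st < ed then
    if pyBlank (lines.getD (ed - 1) "") then aEnd lines st (ed - 1) else ed
  else ed
termination_by ed

def trim_blank_lines_py (lines : List String) : List String :=
  let st := aStart lines lines.length 0
  let ed := aEnd lines st lines.length
  (PySem.List.slice lines (some (st : Int)) (some (ed : Int))).map PySem.Str.rstrip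

-- ===== PORT B =====
def trim_blank_lines_py_alt (lines : List String) : List String :=
  let idx : List Int := ((PySem.List.enumerate lines 0).filter (fun il => !(pyBlank il.2))).map (·.1)
  match idx with
  | [] => []
  | i :: rest =>
      (PySem.List.slice lines (some i) (some (rest.getLastD i + 1))).map PySem.Str.rstrip

-- ===== PRECONDITION & SPEC =====
def Spec_trim_blank_lines_py (lines : List String) (out : List String) : Prop := out = trim_blank_lines_py_alt lines
instance (lines : List String) (out : List String) : Decidable (Spec_trim_blank_lines_py lines out) := by unfold Spec_trim_blank_lines_py; infer_instance

-- ===== CLAIM (what is proved, stated in full; the proofs are below) =====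
def Claim_equal_trim_blank_lines_py : Prop := ∀ (lines : List String), Dom_trim_blank_lines_py lines → Spec_trim_blank_lines_py lines (trim_blank_lines_py lines)

-- ===== LEMMAS AND PROOFS =====

-- the non-blank indices of `lines`, as naturals
def RIdx (xs : List String) : List Nat :=
  (List.range xs.length).filter (fun j => !(pyBlank (xs.getD j "")))

theorem RIdx_cons (x : String) (xs : List String) :
    RIdx (x :: xs) =
      if pyBlank x then (RIdx xs).map (· + 1) else 0 :: (RIdx xs).map (· + 1) := by
  unfold RIdx
  simp only [List.length_cons, List.range_succ_eq_map, List.filter_cons, List.filter_map]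
  simp only [List.getD_cons_zero, Function.comp_def, Nat.succ_eq_add_one, List.getD_cons_succ]
  by_cases h : pyBlank x <;> simp [h]

-- B's idx list equals RIdx shifted by the enumerate start
theorem idx_eq_RIdx (xs : List String) : ∀ (s : Int),
    ((PySem.List.enumerate xs s).filter (fun il => !(pyBlank il.2))).map (·.1)
      = (RIdx xs).map (fun j : Nat => s + (j : Int)) := by
  induction xs with
  | nil => intro s; simp [PySem.List.enumerate_nil, RIdx]
  | cons x t ih =>
    intro s
    rw [PySem.List.enumerate_cons, RIdx_cons]
    by_cases h : pyBlank x
    · simp only [List.filter_cons, h, Bool.not_true, Bool.false_eq_true, if_false]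
      rw [ih (s+1), if_pos trivial, List.map_map]
      congr 1; funext j; simp only [Function.comp_apply]; push_cast; ring
    · simp only [List.filter_cons, h, Bool.not_false, if_true, List.map_cons]
      rw [ih (s+1), if_neg (by simp), List.map_cons, List.map_map]
      congr 1
      · push_cast; ring
      · congr 1; funext j; simp only [Function.comp_apply]; push_cast; ring

theorem mem_RIdx {xs : List String} {j : Nat} :
    j ∈ RIdx xs ↔ j < xs.length ∧ pyBlank (xs.getD j "") = false := by
  simp [RIdx]

theorem RIdx_pairwise (xs : List String) : (RIdx xs).Pairwise (· < ·) :=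
  List.Pairwise.sublist (List.filter_sublist) (List.pairwise_lt_range)

theorem le_getLastD_of_pairwise {l : List Nat} (h : l.Pairwise (· < ·)) :
    ∀ a ∈ l, ∀ d, a ≤ l.getLastD d := by
  induction l with
  | nil => intro a ha; cases ha
  | cons b t ih =>
    intro a ha d
    rw [List.getLastD_cons]
    rcases List.mem_cons.mp ha with rfl | hm
    · cases t with
      | nil => simp
      | cons c u =>
        have hac : a < c := (List.pairwise_cons.mp h).1 c (List.mem_cons_self)
        have := ih (List.pairwise_cons.mp h).2 c (List.mem_cons_self) a
        omega
    · exact ih (List.pairwise_cons.mp h).2 a hm b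

-- A's first loop, shifted one step
theorem aStart_shift (x : String) (xs : List String) (m st : Nat) :
    aStart (x :: xs) (m + 1) (st + 1) = aStart xs m st + 1 := by
  fun_induction aStart xs m st with
  | case1 st h hb ih =>
    rw [aStart]
    simp only [List.getD_cons_succ]
    rw [dif_pos (by omega), if_pos hb]
    exact ih
  | case2 st h hb =>
    rw [aStart]
    simp only [List.getD_cons_succ]
    rw [dif_pos (by omega), if_neg (by simp_all)]
  | case3 st h =>
    rw [aStart, dif_neg (by omega)]

-- A's first loop finds the first non-blank index
theorem aStart_spec (xs : List String) :
    aStart xs xs.length 0 = xs.findIdx (fun s => !(pyBlank s)) := by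
  induction xs with
  | nil => rw [aStart]; simp
  | cons x t ih =>
    rw [aStart]
    simp only [List.length_cons, List.getD_cons_zero, List.findIdx_cons]
    rw [dif_pos (by omega)]
    by_cases hb : pyBlank x
    · rw [if_pos hb, aStart_shift, ih]
      simp [hb]
    · rw [if_neg hb]
      simp [hb]

theorem RIdx_head_eq_findIdx {xs : List String} : ∀ {i : Nat} {rest : List Nat},
    RIdx xs = i :: rest → i = xs.findIdx (fun s => !(pyBlank s)) := by
  induction xs with
  | nil => intro i rest h; simp [RIdx] at h
  | cons x t ih =>
    intro i rest h
    rw [RIdx_cons] at h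
    by_cases hb : pyBlank x
    · rw [if_pos hb] at h
      rcases List.map_eq_cons_iff.mp h with ⟨j, rest', hR, rfl, rfl⟩
      rw [List.findIdx_cons]
      simp [hb, ih hR]
    · rw [if_neg hb] at h
      injection h with h1 _
      rw [List.findIdx_cons]
      simp [hb, ← h1]

theorem findIdx_eq_length_of_RIdx_nil {xs : List String}
    (h : RIdx xs = []) : xs.findIdx (fun s => !(pyBlank s)) = xs.length := by
  rw [List.findIdx_eq_length]
  intro x hx
  rcases List.mem_iff_getElem.mp hx with ⟨j, hj, rfl⟩
  have hnm : j ∉ RIdx xs := by simp [h]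
  simp only [RIdx, List.mem_filter, List.mem_range] at hnm
  push Not at hnm
  have := hnm hj
  simp only [List.getD_eq_getElem?_getD, List.getElem?_eq_getElem hj] at this
  simpa using this

theorem aEnd_stop (lines : List String) (st : Nat) : aEnd lines st st = st := by
  rw [aEnd, dif_neg (by omega)]

-- A's second loop stops at one past the last non-blank index L
theorem aEnd_spec (lines : List String) (st L : Nat) :
    ∀ ed, st ≤ L → L < ed → ed ≤ lines.length →
    pyBlank (lines.getD L "") = false →
    (∀ j, L < j → j < lines.length → pyBlank (lines.getD j "") = true) →
    aEnd lines st ed = L + 1 := by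
  intro ed
  induction ed using Nat.strong_induction_on with
  | _ ed ih =>
    intro hstL hLed hedn hL hblank
    rw [aEnd, dif_pos (by omega)]
    by_cases hE : L + 1 = ed
    · rw [show ed - 1 = L by omega, if_neg (by simp only [hL]; simp)]
      omega
    · have hb : pyBlank (lines.getD (ed - 1) "") = true := hblank (ed - 1) (by omega) (by omega)
      rw [if_pos hb]
      exact ih (ed - 1) (by omega) hstL (by omega) (by omega) hL hblank

theorem getLastD_map {α β : Type} (f : α → β) (l : List α) :
    ∀ d, (l.map f).getLastD (f d) = f (l.getLastD d) := by
  induction l with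
  | nil => intro d; simp
  | cons b t ih => intro d; rw [List.map_cons, List.getLastD_cons, List.getLastD_cons, ih b]

-- ===== VERDICT (by name: the statement is the Claim_ definition above) =====
theorem trim_blank_lines_py_spec : Claim_equal_trim_blank_lines_py := by
  intro lines _
  unfold Spec_trim_blank_lines_py trim_blank_lines_py trim_blank_lines_py_alt
  have hidx : ((PySem.List.enumerate lines 0).filter (fun il => !(pyBlank il.2))).map (·.1)
      = (RIdx lines).map (fun j : Nat => (j : Int)) := by
    rw [idx_eq_RIdx]; congr 1; funext j; simp
  rcases hR : RIdx lines with _ | ⟨i, rest⟩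
  · -- every line is blank: B returns [], A's slice is empty
    have hst : aStart lines lines.length 0 = lines.length := by
      rw [aStart_spec, findIdx_eq_length_of_RIdx_nil hR]
    simp only [hidx, hR, List.map_nil]
    rw [hst, aEnd_stop, PySem.List.slice_natCast]
    simp
  · -- i is the first non-blank index, L the last one
    have hst : aStart lines lines.length 0 = i := by
      rw [aStart_spec, ← RIdx_head_eq_findIdx hR]
    have hmemL : rest.getLastD i ∈ RIdx lines := by
      rw [hR]; exact List.getLastD_mem_cons
    have hLlt : rest.getLastD i < lines.length := (mem_RIdx.mp hmemL).1
    have hLnb : pyBlank (lines.getD (rest.getLastD i) "") = false := (mem_RIdx.mp hmemL).2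
    have hiL : i ≤ rest.getLastD i := by
      have := le_getLastD_of_pairwise (hR ▸ RIdx_pairwise lines) i (List.mem_cons_self) 0
      rwa [List.getLastD_cons] at this
    have hblank : ∀ j, rest.getLastD i < j → j < lines.length →
        pyBlank (lines.getD j "") = true := by
      intro j hLj hjn
      by_contra hc
      have hjm : j ∈ RIdx lines := mem_RIdx.mpr ⟨hjn, by simpa using hc⟩
      have := le_getLastD_of_pairwise (RIdx_pairwise lines) j hjm i
      rw [hR, List.getLastD_cons] at this
      omega
    have hed : aEnd lines i lines.length = rest.getLastD i + 1 :=
      aEnd_spec lines i (rest.getLastD i) lines.length hiL (by omega) (le_refl _) hLnb hblank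
    simp only [hidx, hR, List.map_cons]
    rw [hst, hed]
    have hlast : (rest.map (fun j : Nat => (j : Int))).getLastD (i : Int)
        = ((rest.getLastD i : Nat) : Int) := getLastD_map _ rest i
    rw [hlast, show ((rest.getLastD i : Nat) : Int) + 1 = (((rest.getLastD i + 1 : Nat) : Int)) by push_cast; ring]
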